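-- pv_equiv track=rewrite | github.com/ChestnutMongrel/advent-of-code | y2017/06_millisecond.py | reload
-- ===== SOURCE A (Python) =====
-- from math import ceil
--
-- def reload(data: tuple) -> tuple:
--     blocks_amount = len(data)
--     new_data = list(data)
--
--     biggest = max(data)
--     ind_max = data.index(biggest)
--
--     new_data[ind_max] = 0
--     load = ceil(biggest / blocks_amount)
--     amount = biggest % blocks_amount or blocks_amount
--
--     for ind in range(ind_max + 1, ind_max + amount + 1):
--         new_data[ind % blocks_amount] += load
--     load -= 1
--     for ind in range(ind_max + amount + 1, ind_max + blocks_amount + 1):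
--         new_data[ind % blocks_amount] += load
--
--     return tuple(new_data)
-- ===== SOURCE B (Python) =====
-- def reload(data: tuple) -> tuple:
--     # one pass: every slot gets biggest // n, and the r slots just after the
--     # maximum (cyclically) get one extra, where r = biggest % n
--     n = len(data)
--     biggest = max(data)
--     i = data.index(biggest)
--     q, r = divmod(biggest, n)
--     out = []
--     for j, v in enumerate(data):
--         d = (j - i - 1) % n
--         out.append((0 if j == i else v) + q + (1 if d < r else 0))
--     return tuple(out)
-- ===== Notes on version B (the rewrite author's own statement) =====
-- stated objective: simpler
-- what changed: Replaces A's ceil/remainder split into two modular range()-loops by a single enumerate pass that computes each slot's new value directly from divmod(biggest, n) and the slot's cyclic distance to the maximum.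
import Mathlib
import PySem

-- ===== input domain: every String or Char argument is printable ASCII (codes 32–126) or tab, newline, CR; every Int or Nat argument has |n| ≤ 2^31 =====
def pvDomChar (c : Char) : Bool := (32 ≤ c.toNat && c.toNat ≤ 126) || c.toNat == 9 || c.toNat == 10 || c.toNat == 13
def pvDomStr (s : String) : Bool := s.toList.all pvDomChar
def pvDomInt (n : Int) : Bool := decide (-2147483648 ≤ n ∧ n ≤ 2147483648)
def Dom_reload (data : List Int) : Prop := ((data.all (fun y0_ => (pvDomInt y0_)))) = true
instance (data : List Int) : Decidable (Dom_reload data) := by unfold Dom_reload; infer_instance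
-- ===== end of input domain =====

-- B replaces A's two modular range()-loops (ceil-load then load-1) by one enumerate pass
-- computing each slot's share directly from divmod and its cyclic distance to the maximum (objective: simpler).

-- ===== PORT A =====
-- math.ceil(biggest / n) is exact ceiling division on Dom (|biggest| ≤ 2^31 is exactly
-- representable as a double and the quotient never rounds across an integer there);
-- ported as exact ceiling -((-biggest) // n).
def reload (data : List Int) : List Int :=
  let n : Int := PySem.List.len data
  match PySem.List.max? data (fun x => x) with
  | none => []  -- max(()) raises ValueError: outside Pre_reload
  | some biggest =>
    let i : Nat := (PySem.List.index? data biggest).getD 0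
    let nd := data.set i 0
    let load := -(PySem.Int.floordiv (-biggest) n)
    let amount := if PySem.Int.mod biggest n = 0 then n else PySem.Int.mod biggest n
    let nd := (PySem.List.pyRange ((i : Int) + 1) ((i : Int) + amount + 1) 1).foldl
      (fun l ind => l.modify (PySem.Int.mod ind n).toNat (· + load)) nd
    let load := load - 1
    let nd := (PySem.List.pyRange ((i : Int) + amount + 1) ((i : Int) + n + 1) 1).foldl
      (fun l ind => l.modify (PySem.Int.mod ind n).toNat (· + load)) nd
    nd

-- ===== PORT B =====
def reload_alt (data : List Int) : List Int :=
  let n : Int := PySem.List.len data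
  match PySem.List.max? data (fun x => x) with
  | none => []  -- max(()) raises ValueError: outside Pre_reload
  | some biggest =>
    let i : Nat := (PySem.List.index? data biggest).getD 0
    let q := PySem.Int.floordiv biggest n
    let r := PySem.Int.mod biggest n
    (PySem.List.enumerate data 0).foldl
      (fun out jv =>
        let d := PySem.Int.mod (jv.1 - (i : Int) - 1) n
        out ++ [(if jv.1 = (i : Int) then 0 else jv.2) + q + (if d < r then 1 else 0)]) []

-- ===== PRECONDITION & SPEC =====
-- Pre_ excludes only the empty list, on which A raises ValueError (max() of empty sequence); B raises there too.
def Pre_reload (data : List Int) : Prop := data ≠ []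
instance (data : List Int) : Decidable (Pre_reload data) := by unfold Pre_reload; infer_instance
def pvWitness_reload : List Int := [0, 2, 7, 0]

def Spec_reload (data : List Int) (out : List Int) : Prop := out = reload_alt data
instance (data : List Int) (out : List Int) : Decidable (Spec_reload data out) := by unfold Spec_reload; infer_instance

-- ===== CLAIM (what is proved, stated in full; the proofs are below) =====
def Claim_equal_reload : Prop := ∀ (data : List Int), Dom_reload data → Pre_reload data → Spec_reload data (reload data)

-- ===== LEMMAS AND PROOFS =====

theorem emod_add_right' (x N : Int) : (x + N) % N = x % N := by
  simp [Int.add_mul_emod_self_left (a := x) (b := N) (c := 1)]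

-- subtracting before or after reducing the left operand mod N is the same
theorem emod_shift_sub (x y N : Int) : (x - y) % N = (x % N - y) % N := by
  conv_lhs => rw [Int.sub_emod]
  conv_rhs => rw [Int.sub_emod, Int.emod_emod_of_dvd x (dvd_refl N)]

-- ditto for the right operand
theorem emod_shift_sub' (x y N : Int) : (x - y) % N = (x - y % N) % N := by
  conv_lhs => rw [Int.sub_emod]
  conv_rhs => rw [Int.sub_emod, Int.emod_emod_of_dvd y (dvd_refl N)]

theorem length_fold_circ (c N : Int) (xs : List Int) : ∀ (l : List Int),
    (xs.foldl (fun l' ind => l'.modify (ind % N).toNat (· + c)) l).length = l.length := by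
  induction xs with
  | nil => intro l; rfl
  | cons x xs ih => intro l; rw [List.foldl_cons, ih, List.length_modify]

-- A's circular loop: index j of l receives c iff the cyclic distance from a to j is < k
theorem fold_circ (c N : Int) (k : Nat) :
    ∀ (a : Int) (l : List Int), 0 ≤ a → N = (l.length : Int) → k ≤ l.length →
    ∀ (j : Nat) (hj : j < l.length),
      ((PySem.List.pyRange a (a + (k : Int)) 1).foldl
        (fun l' ind => l'.modify (ind % N).toNat (· + c)) l)[j]? =
      some (l[j] + (if ((j : Int) - a) % N < (k : Int) then c else 0)) := by
  induction k with
  | zero =>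
    intro a l ha hN hk j hj
    have hN0 : 0 < N := by rw [hN]; exact_mod_cast (by omega : 0 < l.length)
    have hnn : 0 ≤ ((j : Int) - a) % N := Int.emod_nonneg _ (by omega)
    rw [PySem.List.pyRange_one_eq_nil (by simp), List.foldl_nil,
        List.getElem?_eq_getElem hj, if_neg (by push_cast; omega)]
    simp
  | succ k ih =>
    intro a l ha hN hk j hj
    have hlen : 0 < l.length := by omega
    have hN0 : 0 < N := by rw [hN]; exact_mod_cast hlen
    rw [PySem.List.pyRange_one_cons (by push_cast; omega), List.foldl_cons]
    have hlen' : (l.modify (a % N).toNat (· + c)).length = l.length := List.length_modify ..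
    rw [show a + ((k + 1 : Nat) : Int) = (a + 1) + (k : Int) by push_cast; ring]
    rw [ih (a + 1) _ (by omega) (by rw [List.length_modify]; exact hN) (by omega) j (by omega)]
    simp only [Option.some.injEq]
    rw [List.getElem_modify]
    -- arithmetic on cyclic distances
    have he0 : 0 ≤ a % N := Int.emod_nonneg a (by omega)
    have heN : a % N < N := Int.emod_lt_of_pos a hN0
    have hjN : (j : Int) < N := by rw [hN]; exact_mod_cast hj
    have hkN : (k : Int) + 1 ≤ N := by rw [hN]; exact_mod_cast hk
    have hDval : ((j : Int) - a) % N =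
        if a % N ≤ (j : Int) then (j : Int) - a % N else (j : Int) - a % N + N := by
      rw [emod_shift_sub']
      split_ifs with h
      · exact Int.emod_eq_of_lt (by omega) (by omega)
      · rw [← emod_add_right' ((j : Int) - a % N) N]
        exact Int.emod_eq_of_lt (by omega) (by omega)
    have hD0 : 0 ≤ ((j : Int) - a) % N ∧ ((j : Int) - a) % N < N := by
      constructor
      · exact Int.emod_nonneg _ (by omega)
      · exact Int.emod_lt_of_pos _ hN0
    have hd'val : ((j : Int) - (a + 1)) % N =
        if ((j : Int) - a) % N = 0 then N - 1 else ((j : Int) - a) % N - 1 := by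
      rw [show (j : Int) - (a + 1) = ((j : Int) - a) - 1 by ring, emod_shift_sub]
      split_ifs with h
      · rw [h, show (0 : Int) - 1 = -1 by ring, ← emod_add_right' (-1) N,
            show (-1 : Int) + N = N - 1 by ring]
        exact Int.emod_eq_of_lt (by omega) (by omega)
      · exact Int.emod_eq_of_lt (by omega) (by omega)
    have hej : ((a % N).toNat = j) ↔ ((j : Int) - a) % N = 0 := by
      rw [hDval]; split_ifs with h <;> omega
    rw [hd'val]
    by_cases h0 : ((j : Int) - a) % N = 0
    · rw [if_pos (hej.mpr h0), if_pos h0, if_neg (by omega),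
          if_pos (by push_cast; omega)]
      ring
    · rw [if_neg (fun hc => h0 (hej.mp hc)), if_neg h0]
      push_cast
      split_ifs <;> omega

-- exact ceiling division: math.ceil(b / N) = b // N + (0 if b % N == 0 else 1) for N > 0
theorem ceil_div_eq (b N : Int) (hN : 0 < N) :
    -(PySem.Int.floordiv (-b) N) =
      PySem.Int.floordiv b N + (if PySem.Int.mod b N = 0 then 0 else 1) := by
  rw [PySem.Int.neg_floordiv_neg_eq_iff_of_pos hN]
  have h := PySem.Int.floordiv_mul_add_mod b N
  have hm := PySem.Int.mod_eq_emod_of_pos (a := b) hN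
  have hr0 : 0 ≤ PySem.Int.mod b N := by rw [hm]; exact Int.emod_nonneg b (by omega)
  have hrN : PySem.Int.mod b N < N := by rw [hm]; exact Int.emod_lt_of_pos b hN
  split_ifs with hz
  · constructor
    · have e : (PySem.Int.floordiv b N + 0 - 1) * N = PySem.Int.floordiv b N * N - N := by ring
      rw [e]; linarith
    · have e : (PySem.Int.floordiv b N + 0) * N = PySem.Int.floordiv b N * N := by ring
      rw [e]; linarith
  · constructor
    · have e : (PySem.Int.floordiv b N + 1 - 1) * N = PySem.Int.floordiv b N * N := by ring
      rw [e]; omega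
    · have e : (PySem.Int.floordiv b N + 1) * N = PySem.Int.floordiv b N * N + N := by ring
      rw [e]; linarith

-- ===== VERDICT (by name: the statement is the Claim_ definition above) =====
theorem reload_spec : Claim_equal_reload := by
  intro data _ hpre
  unfold Spec_reload
  obtain ⟨b, hb⟩ : ∃ b, PySem.List.max? data (fun x => x) = some b := by
    rcases h : PySem.List.max? data (fun x => x) with _ | b
    · exact absurd ((PySem.List.max?_eq_none_iff data _).mp h) hpre
    · exact ⟨b, rfl⟩
  have hbmem : b ∈ data := PySem.List.max?_mem hb
  obtain ⟨i, hi⟩ : ∃ i, PySem.List.index? data b = some i := by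
    have := (PySem.List.index?_isSome_iff data b).mpr hbmem
    exact Option.isSome_iff_exists.mp this
  obtain ⟨hilen, -, -⟩ := PySem.List.getElem_of_index?_eq_some hi
  have hlen : 0 < data.length := by omega
  have hN0 : (0 : Int) < (data.length : Int) := by exact_mod_cast hlen
  simp only [reload, reload_alt, PySem.List.len_eq, hb, hi, Option.getD_some]
  simp only [PySem.Int.mod_eq_emod_of_pos hN0]
  rw [PySem.List.foldl_append_singleton_eq_map, List.nil_append]
  -- abbreviations
  set N : Int := (data.length : Int) with hNdef
  set q : Int := PySem.Int.floordiv b N with hq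
  set r : Int := b % N with hr
  have hr0 : 0 ≤ r := Int.emod_nonneg b (by omega)
  have hrN : r < N := Int.emod_lt_of_pos b hN0
  set amount : Int := if r = 0 then N else r with hamount
  have ham1 : 1 ≤ amount := by rw [hamount]; split_ifs <;> omega
  have hamN : amount ≤ N := by rw [hamount]; split_ifs <;> omega
  have hload : -(PySem.Int.floordiv (-b) N) = q + (if r = 0 then 0 else 1) := by
    have := ceil_div_eq b N hN0
    rwa [PySem.Int.mod_eq_emod_of_pos hN0, ← hr, ← hq] at this
  rw [hload]
  have hlenset : (data.set i 0).length = data.length := List.length_set ..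
  have hlen1 : ((PySem.List.pyRange ((i : Int) + 1) ((i : Int) + amount + 1) 1).foldl
      (fun l ind => l.modify (ind % N).toNat (· + (q + if r = 0 then 0 else 1))) (data.set i 0)).length
      = data.length := by rw [length_fold_circ, hlenset]
  apply List.ext_getElem?
  intro j
  by_cases hj : j < data.length
  · -- inner circular loop characterisation
    have hinner := fold_circ (q + if r = 0 then 0 else 1) N amount.toNat ((i : Int) + 1)
        (data.set i 0) (by omega) (by rw [hlenset]) (by omega) j (by omega)
    rw [show ((i : Int) + 1) + ((amount.toNat : Int)) = (i : Int) + amount + 1 by omega] at hinner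
    set M := (PySem.List.pyRange ((i : Int) + 1) ((i : Int) + amount + 1) 1).foldl
      (fun l ind => l.modify (ind % N).toNat (· + (q + if r = 0 then 0 else 1))) (data.set i 0) with hM
    have hMlen : M.length = data.length := by rw [hM, length_fold_circ, hlenset]
    rw [List.getElem?_eq_getElem (show j < M.length by omega)] at hinner
    have hMj := Option.some.inj hinner
    -- outer circular loop
    rw [show (i : Int) + N + 1 = ((i : Int) + amount + 1) + (((N - amount).toNat : Int)) by omega]
    rw [fold_circ _ N (N - amount).toNat ((i : Int) + amount + 1) M (by omega)
        (by rw [hMlen]) (by omega) j (by omega)]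
    rw [hMj]
    -- B side
    rw [List.getElem?_eq_getElem (by simp only [List.length_map, PySem.List.length_enumerate]; exact hj),
        List.getElem_map, PySem.List.getElem_enumerate]
    simp only [Option.some.injEq, zero_add]
    rw [List.getElem_set]
    -- cyclic-distance bookkeeping
    set D : Int := ((j : Int) - ((i : Int) + 1)) % N with hD
    have hD0 : 0 ≤ D := Int.emod_nonneg _ (by omega)
    have hDN : D < N := Int.emod_lt_of_pos _ hN0
    have hcond2 : ((j : Int) - ((i : Int) + amount + 1)) % N =
        if amount ≤ D then D - amount else D - amount + N := by
      rw [show (j : Int) - ((i : Int) + amount + 1) = ((j : Int) - ((i : Int) + 1)) - amount by ring,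
          emod_shift_sub, ← hD]
      split_ifs with h
      · exact Int.emod_eq_of_lt (by omega) (by omega)
      · rw [← emod_add_right' (D - amount) N]
        exact Int.emod_eq_of_lt (by omega) (by omega)
    have hBd : ((j : Int) - (i : Int) - 1) % N = D := by
      rw [hD, show (j : Int) - ((i : Int) + 1) = (j : Int) - (i : Int) - 1 by ring]
    rw [hcond2, hBd]
    rw [Int.toNat_of_nonneg (by omega : (0:Int) ≤ amount),
        Int.toNat_of_nonneg (by omega : (0:Int) ≤ N - amount)]
    have hamval : (r = 0 ∧ amount = N) ∨ (r ≠ 0 ∧ amount = r) := by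
      rw [hamount]; split_ifs with h
      exacts [Or.inl ⟨h, rfl⟩, Or.inr ⟨h, rfl⟩]
    rcases hamval with ⟨h1, h2⟩ | ⟨h1, h2⟩ <;> split_ifs <;> omega
  · rw [List.getElem?_eq_none (by rw [length_fold_circ, hlen1]; omega),
        List.getElem?_eq_none (by simp only [List.length_map, PySem.List.length_enumerate]; omega)]
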